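-- pv_equiv track=rewrite | github.com/pypi-data/pypi-mirror-295 | packages/velocitas-lib/velocitas_lib-0.0.13.tar.gz/velocitas_lib-0.0.13/velocitas_lib/text_utils.py | replace_text_area
-- ===== SOURCE A (Python) =====
-- from typing import List
--
-- def replace_text_area(
--     text: List[str], start_occurence: str, end_occurence: str, replacement: str = ""
-- ) -> List[str]:
--     """Replace all occurrences of all text areas matching the parameters with a replacement.
--     If the replacement for a line is empty, then the line will be removed.
--
--     Args:
--         text (List[str]): All text lines to replace text within.
--         start_occurence (str): The starting line which matches the occurence for replacement text area.
--         start_occurence (str): The ending line which matches the occurence for replacement text area.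
--         replacement (str): The replacement for text area.
--     """
--     buffer = []
--     is_capturing = False
--
--     for line in text:
--         occurence_count = line.count(start_occurence)
--         if not is_capturing:
--             if occurence_count == 0:
--                 buffer.append(line)
--             elif occurence_count == 1:
--                 is_capturing = True
--
--             continue
--
--         if end_occurence in line:
--             is_capturing = False
--
--             if replacement:
--                 buffer.append(replacement)
--
--     return buffer
-- ===== SOURCE B (Python) =====
-- def replace_text_area(
--     text, start_occurence, end_occurence, replacement=""
-- ):
--     out = []
--     i, n = 0, len(text)
--     while i < n:
--         line = text[i]
--         c = line.count(start_occurence)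
--         if c == 0:
--             out.append(line)
--             i += 1
--         elif c >= 2:
--             i += 1
--         else:
--             i += 1
--             while i < n and end_occurence not in text[i]:
--                 i += 1
--             if i < n:
--                 if replacement:
--                     out.append(replacement)
--                 i += 1
--     return out
-- ===== Notes on version B (the rewrite author's own statement) =====
-- stated objective: alternative
-- what changed: Replaced the single pass with a boolean is_capturing flag by a two-phase index loop: an outer scan over lines plus an inner skip-loop that advances to the first line containing the end marker, appending the replacement only if such a line exists.
import Mathlib
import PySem

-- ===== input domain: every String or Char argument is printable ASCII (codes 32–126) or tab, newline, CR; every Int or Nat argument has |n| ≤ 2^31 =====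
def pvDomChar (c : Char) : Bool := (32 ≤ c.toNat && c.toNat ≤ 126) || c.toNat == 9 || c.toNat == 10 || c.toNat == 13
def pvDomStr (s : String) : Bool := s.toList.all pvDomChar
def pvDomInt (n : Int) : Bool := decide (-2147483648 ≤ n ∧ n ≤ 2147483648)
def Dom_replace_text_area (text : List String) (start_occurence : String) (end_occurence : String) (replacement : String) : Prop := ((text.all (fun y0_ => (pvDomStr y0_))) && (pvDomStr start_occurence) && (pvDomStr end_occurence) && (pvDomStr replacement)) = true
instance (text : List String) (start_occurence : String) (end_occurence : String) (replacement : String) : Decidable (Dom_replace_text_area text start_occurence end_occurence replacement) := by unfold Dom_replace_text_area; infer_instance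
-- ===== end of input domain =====

-- B replaces A's single pass with a boolean capture flag by a two-phase scan (outer
-- recursion over lines + inner skip-to-end-marker via dropWhile); same cost, different
-- decomposition (objective: alternative).

-- ===== PORT A =====
-- the body of A's for-loop: state = (buffer, is_capturing)
def pvStepA (start_occurence : String) (end_occurence : String) (replacement : String)
    (st : List String × Bool) (line : String) : List String × Bool :=
  let occurence_count := PySem.Str.count line start_occurence
  if st.2 = false then
    if occurence_count = 0 then (st.1 ++ [line], st.2)
    else if occurence_count = 1 then (st.1, true)
    else st
  else
    if PySem.Str.isIn end_occurence line then
      if replacement ≠ "" then (st.1 ++ [replacement], false) else (st.1, false)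
    else st

def replace_text_area (text : List String) (start_occurence : String) (end_occurence : String) (replacement : String) : List String :=
  (text.foldl (pvStepA start_occurence end_occurence replacement) ([], false)).1

-- ===== PORT B =====
-- outer scan; on a single start marker, skip to the first line containing the end
-- marker (the inner while-loop of Source B, as dropWhile) and continue after it
def pvGoB (start_occurence : String) (end_occurence : String) (replacement : String) :
    List String → List String
  | [] => []
  | line :: rs =>
    let c := PySem.Str.count line start_occurence
    if c = 0 then line :: pvGoB start_occurence end_occurence replacement rs
    else if 2 ≤ c then pvGoB start_occurence end_occurence replacement rs
    else
      let rs' := rs.dropWhile (fun l => !(PySem.Str.isIn end_occurence l))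
      if rs' = [] then []
      else (if replacement ≠ "" then [replacement] else []) ++
          pvGoB start_occurence end_occurence replacement rs'.tail
termination_by l => l.length
decreasing_by
  · simp
  · simp
  · have h1 : (rs.dropWhile (fun l => !(PySem.Str.isIn end_occurence l))).length ≤ rs.length :=
      List.length_dropWhile_le _ _
    have h2 : (rs.dropWhile (fun l => !(PySem.Str.isIn end_occurence l))).tail.length ≤
        (rs.dropWhile (fun l => !(PySem.Str.isIn end_occurence l))).length := by
      simp [List.length_tail]
    simp only [List.length_cons]
    omega

def replace_text_area_alt (text : List String) (start_occurence : String) (end_occurence : String) (replacement : String) : List String :=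
  pvGoB start_occurence end_occurence replacement text

-- ===== PRECONDITION & SPEC =====
def Spec_replace_text_area (text : List String) (start_occurence : String) (end_occurence : String) (replacement : String) (out : List String) : Prop := out = replace_text_area_alt text start_occurence end_occurence replacement
instance (text : List String) (start_occurence : String) (end_occurence : String) (replacement : String) (out : List String) : Decidable (Spec_replace_text_area text start_occurence end_occurence replacement out) := by unfold Spec_replace_text_area; infer_instance

-- ===== CLAIM (what is proved, stated in full; the proofs are below) =====
def Claim_equal_replace_text_area : Prop := ∀ (text : List String) (start_occurence : String) (end_occurence : String) (replacement : String), Dom_replace_text_area text start_occurence end_occurence replacement → Spec_replace_text_area text start_occurence end_occurence replacement (replace_text_area text start_occurence end_occurence replacement)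

-- ===== LEMMAS AND PROOFS =====

-- what A's fold computes from the capturing state, phrased with B's skip
def pvCapRes (start_occurence : String) (end_occurence : String) (replacement : String)
    (rs : List String) : List String :=
  let rs' := rs.dropWhile (fun l => !(PySem.Str.isIn end_occurence l))
  if rs' = [] then []
  else (if replacement ≠ "" then [replacement] else []) ++
      pvGoB start_occurence end_occurence replacement rs'.tail

lemma pvGoB_cons_one (s e r : String) (line : String) (rs : List String)
    (h : PySem.Chars.count line.toList s.toList = 1) :
    pvGoB s e r (line :: rs) = pvCapRes s e r rs := by
  rw [pvGoB, pvCapRes]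
  simp only [PySem.Str.count_eq, h]
  norm_num

lemma pv_main (s e r : String) : ∀ (n : Nat) (rest : List String), rest.length ≤ n →
    ∀ buffer : List String,
      ((rest.foldl (pvStepA s e r) (buffer, false)).1 = buffer ++ pvGoB s e r rest) ∧
      ((rest.foldl (pvStepA s e r) (buffer, true)).1 = buffer ++ pvCapRes s e r rest) := by
  intro n
  induction n with
  | zero =>
    intro rest hlen buffer
    have : rest = [] := List.eq_nil_of_length_eq_zero (Nat.le_zero.mp hlen)
    subst this
    constructor
    · simp [pvGoB]
    · simp [pvCapRes, List.dropWhile]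
  | succ n ih =>
    intro rest hlen buffer
    match rest with
    | [] =>
      constructor
      · simp [pvGoB]
      · simp [pvCapRes, List.dropWhile]
    | line :: rs =>
      have hrs : rs.length ≤ n := by simpa using Nat.lt_succ_iff.mp (Nat.lt_of_lt_of_le (by simp) hlen)
      constructor
      · -- non-capturing state
        rw [List.foldl_cons]
        by_cases h0 : PySem.Chars.count line.toList s.toList = 0
        · have hstep : pvStepA s e r (buffer, false) line = (buffer ++ [line], false) := by
            simp only [pvStepA, PySem.Str.count_eq, h0]
            simp
          rw [hstep, (ih rs hrs (buffer ++ [line])).1]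
          rw [pvGoB]
          simp only [PySem.Str.count_eq, h0]
          simp
        · by_cases h1 : PySem.Chars.count line.toList s.toList = 1
          · have hstep : pvStepA s e r (buffer, false) line = (buffer, true) := by
              simp only [pvStepA, PySem.Str.count_eq, h1]
              simp
            rw [hstep, (ih rs hrs buffer).2, pvGoB_cons_one s e r line rs h1]
          · have hstep : pvStepA s e r (buffer, false) line = (buffer, false) := by
              simp only [pvStepA, PySem.Str.count_eq, h0, h1]
              simp
            rw [hstep, (ih rs hrs buffer).1]
            have h2 : 2 ≤ PySem.Chars.count line.toList s.toList := by omega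
            rw [pvGoB]
            simp only [PySem.Str.count_eq]
            simp [h0, h2]
      · -- capturing state
        rw [List.foldl_cons]
        by_cases hin : PySem.Chars.isIn e.toList line.toList = true
        · have hstep : pvStepA s e r (buffer, true) line =
              (buffer ++ (if r ≠ "" then [r] else []), false) := by
            simp only [pvStepA, PySem.Str.isIn_eq, hin]
            norm_num
            split_ifs with hr <;> simp
          rw [hstep, (ih rs hrs _).1]
          have hdrop : (line :: rs).dropWhile (fun l => !(PySem.Str.isIn e l)) = line :: rs := by
            rw [List.dropWhile_cons_of_neg]
            simp [PySem.Str.isIn_eq, hin]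
          rw [pvCapRes]
          simp only [hdrop]
          simp
        · have hstep : pvStepA s e r (buffer, true) line = (buffer, true) := by
            simp only [pvStepA, PySem.Str.isIn_eq]
            simp [hin]
          rw [hstep, (ih rs hrs buffer).2]
          have hdrop : (line :: rs).dropWhile (fun l => !(PySem.Str.isIn e l)) =
              rs.dropWhile (fun l => !(PySem.Str.isIn e l)) := by
            rw [List.dropWhile_cons_of_pos]
            simp [PySem.Str.isIn_eq, hin]
          rw [pvCapRes, pvCapRes]
          simp only [hdrop]

-- ===== VERDICT (by name: the statement is the Claim_ definition above) =====
theorem replace_text_area_spec : Claim_equal_replace_text_area := by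
  intro text s e r _
  show replace_text_area text s e r = replace_text_area_alt text s e r
  rw [replace_text_area, replace_text_area_alt,
    (pv_main s e r text.length text le_rfl []).1]
  simp
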